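-- pv_equiv track=rewrite | github.com/mhrmm/thesis-hien-nguyen | reduction.py | substring_reduction
-- ===== SOURCE A (Python) =====
-- def ngrams(input, n):
--     # Adapted from https://stackoverflow.com/a/13424002
--     input = input.split(' ')
--     output = {}
--     for i in range(len(input)-n+1):
--         g = ' '.join(input[i:i+n])
--         output.setdefault(g, 0)
--         output[g] += 1
--     return output
--
-- def substring_reduction(line, lower=1, upper=4):
--     freq = dict()
--     # get ngram vocab
--     for i in range(lower, upper+1):
--         freq.update(ngrams(line, i))    # get all substrings of length i that appear at least once
--
--
--     freq = {k: freq[k] for k in freq if freq[k] > 1}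
--     reduced = set()#wc = {key: 0 for key in freq}     # a string is a word candidate if it is irreducable
--     for str_i in freq.keys():
--         for str_j in freq.keys():
--             if str_i != str_j and str_i in str_j and freq[str_i] == freq[str_j]:
--                 # str_i is a substring of str_j and have the same frequency as str_j,
--                 # therefore str_i is reducable by str_j
--                 reduced.add(str_i)
--     return [word for word in freq.keys() if word not in reduced]
-- ===== SOURCE B (Python) =====
-- def substring_reduction(line, lower=1, upper=4):
--     words = line.split(' ')
--     freq = {}
--     for n in range(lower, upper + 1):
--         counts = {}
--         for i in range(len(words) - n + 1):
--             g = ' '.join(words[i:i + n])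
--             counts[g] = counts.get(g, 0) + 1
--         freq.update(counts)
--     repeated = [k for k in freq if freq[k] > 1]
--     # bucket the repeated keys by frequency once, so each key is compared
--     # only against keys of the SAME frequency (with early exit), instead of
--     # a full quadratic scan over all pairs building a 'reduced' set
--     groups = {}
--     for k in repeated:
--         groups.setdefault(freq[k], []).append(k)
--     return [k for k in repeated
--             if not any(k != o and k in o for o in groups[freq[k]])]
-- ===== Notes on version B (the rewrite author's own statement) =====
-- stated objective: alternative
-- what changed: Instead of A scanning all pairs of repeated n-grams to build the set of reducible keys, B buckets the repeated keys by frequency in one pass and tests each key for substring-reducibility only against the keys of its own frequency bucket, with early exit.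
import Mathlib
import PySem

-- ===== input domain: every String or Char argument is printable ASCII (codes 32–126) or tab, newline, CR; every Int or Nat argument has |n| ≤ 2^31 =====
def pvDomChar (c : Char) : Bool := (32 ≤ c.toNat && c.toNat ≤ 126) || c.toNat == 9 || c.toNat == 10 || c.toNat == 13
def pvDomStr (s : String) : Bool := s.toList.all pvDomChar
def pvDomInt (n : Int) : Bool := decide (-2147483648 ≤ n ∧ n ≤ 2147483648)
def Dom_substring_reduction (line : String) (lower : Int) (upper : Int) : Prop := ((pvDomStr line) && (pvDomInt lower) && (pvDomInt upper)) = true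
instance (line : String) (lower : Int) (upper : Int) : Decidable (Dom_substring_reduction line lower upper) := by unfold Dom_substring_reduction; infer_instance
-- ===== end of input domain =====

-- B buckets the repeated n-grams by frequency once, so each key is compared only
-- against same-frequency keys (with early exit) instead of A's full pairwise scan.

-- ===== PORT A =====
-- ngrams(input, n): split on ' ', count the joined n-word windows (setdefault, then += 1)
def pyNgrams (input : String) (n : Int) : PySem.Dict String Int :=
  let input' := (PySem.Str.split? input " ").getD []
  (PySem.List.pyRange 0 (PySem.List.len input' - n + 1) 1).foldl
    (fun output i =>
      let g := PySem.Str.join " " (PySem.List.slice input' (some i) (some (i + n)))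
      (output.setdefault g 0).modify g 0 (· + 1))
    PySem.Dict.empty

-- freq = {k: freq[k] for k in freq if freq[k] > 1}
def pvFilterGt1 (freq : PySem.Dict String Int) : PySem.Dict String Int :=
  freq.keys.foldl
    (fun d k => if 1 < freq.getD k 0 then d.insert k (freq.getD k 0) else d)
    PySem.Dict.empty

-- the double loop collecting the 'reduced' set
def pvReducedSet (freq2 : PySem.Dict String Int) : PySem.Set String :=
  freq2.keys.foldl
    (fun red str_i =>
      freq2.keys.foldl
        (fun red str_j =>
          if str_i ≠ str_j ∧ PySem.Str.isIn str_i str_j = true ∧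
              freq2.getD str_i 0 = freq2.getD str_j 0 then
            red.add str_i
          else red)
        red)
    PySem.Set.empty

-- the part of A after the freq-collection loop
def pvReduceA (freq : PySem.Dict String Int) : List String :=
  let freq2 := pvFilterGt1 freq
  let reduced := pvReducedSet freq2
  freq2.keys.foldl
    (fun out word => if reduced.contains word then out else out ++ [word]) []

def substring_reduction (line : String) (lower : Int) (upper : Int) : List String :=
  let freq : PySem.Dict String Int :=
    (PySem.List.pyRange lower (upper + 1) 1).foldl
      (fun freq i => freq.update (pyNgrams line i).items) PySem.Dict.empty
  pvReduceA freq

-- ===== PORT B =====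
-- bucket the repeated keys by their frequency (setdefault(f, []).append(k))
def pvGroups (freq : PySem.Dict String Int) (repeated : List String) :
    PySem.Dict Int (List String) :=
  repeated.foldl (fun g k => g.modify (freq.getD k 0) [] (· ++ [k])) PySem.Dict.empty

-- the part of B after the freq-collection loop
def pvReduceB (freq : PySem.Dict String Int) : List String :=
  let repeated := freq.keys.filter (fun k => 1 < freq.getD k 0)
  let groups := pvGroups freq repeated
  repeated.filter (fun k =>
    !((groups.getD (freq.getD k 0) []).any (fun o => k ≠ o && PySem.Str.isIn k o)))

def substring_reduction_alt (line : String) (lower : Int) (upper : Int) : List String :=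
  let words := (PySem.Str.split? line " ").getD []
  let freq : PySem.Dict String Int :=
    (PySem.List.pyRange lower (upper + 1) 1).foldl
      (fun freq n =>
        let counts : PySem.Dict String Int :=
          (PySem.List.pyRange 0 (PySem.List.len words - n + 1) 1).foldl
            (fun c i =>
              let g := PySem.Str.join " " (PySem.List.slice words (some i) (some (i + n)))
              c.insert g (c.getD g 0 + 1))
            PySem.Dict.empty
        freq.update counts.items)
      PySem.Dict.empty
  pvReduceB freq

-- ===== PRECONDITION & SPEC =====
def Spec_substring_reduction (line : String) (lower : Int) (upper : Int) (out : List String) : Prop := out = substring_reduction_alt line lower upper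
instance (line : String) (lower : Int) (upper : Int) (out : List String) : Decidable (Spec_substring_reduction line lower upper out) := by unfold Spec_substring_reduction; infer_instance

-- ===== CLAIM (what is proved, stated in full; the proofs are below) =====
def Claim_equal_substring_reduction : Prop := ∀ (line : String) (lower : Int) (upper : Int), Dom_substring_reduction line lower upper → Spec_substring_reduction line lower upper (substring_reduction line lower upper)

-- ===== LEMMAS AND PROOFS =====

-- double insert at the same key collapses
theorem pv_insert_insert (d : PySem.Dict String Int) (g : String) (v w : Int) :
    (d.insert g v).insert g w = d.insert g w := by
  apply PySem.Dict.ext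
  have hc1 : (d.insert g v).contains g = true := by
    simp
  by_cases h : d.contains g = true
  · rw [PySem.Dict.items_insert_of_contains _ _ hc1,
        PySem.Dict.items_insert_of_contains _ _ h,
        PySem.Dict.items_insert_of_contains _ _ h, List.map_map]
    apply List.map_congr_left
    intro p _
    by_cases hp : p.1 = g <;> simp [hp]
  · have h' : d.contains g = false := by simpa using h
    rw [PySem.Dict.items_insert_of_contains _ _ hc1,
        PySem.Dict.items_insert_of_not_contains _ _ h',
        PySem.Dict.items_insert_of_not_contains _ _ h', List.map_append]
    have hmem : ∀ p ∈ d.items, (p.1 == g) = false := by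
      intro p hp
      by_contra hcon
      have hpg : p.1 = g := by simpa using hcon
      have : g ∈ d.keys := hpg ▸ PySem.Dict.mem_keys_of_mem_items d hp
      rw [← PySem.Dict.contains_iff_mem_keys] at this
      rw [h'] at this
      cases this
    congr 1
    · calc List.map (fun p => if (p.1 == g) = true then (g, w) else p) d.items
          = List.map id d.items := by
            apply List.map_congr_left
            intro p hp
            simp [hmem p hp]
        _ = d.items := List.map_id d.items
    · simp

-- "d.setdefault(g, 0); d[g] += 1" is "d[g] = d.get(g, 0) + 1"
theorem pv_counter_step (d : PySem.Dict String Int) (g : String) :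
    (d.setdefault g 0).modify g 0 (· + 1) = d.insert g (d.getD g 0 + 1) := by
  have hmod : ∀ (e : PySem.Dict String Int),
      e.modify g 0 (· + 1) = e.insert g (e.getD g 0 + 1) := fun e => rfl
  rw [hmod, PySem.Dict.getD_setdefault_self]
  by_cases h : d.contains g = true
  · rw [PySem.Dict.setdefault_of_contains d 0 h]
  · rw [PySem.Dict.setdefault_of_not_contains d 0 (by simpa using h), pv_insert_insert]

-- membership in the inner conditional Set.add fold
theorem pv_mem_inner_fold (c : String → Prop) [DecidablePred c]
    (l : List String) (a : String) (s : PySem.Set String) (x : String) :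
    x ∈ l.foldl (fun s j => if c j then s.add a else s) s ↔
      x ∈ s ∨ (x = a ∧ ∃ j ∈ l, c j) := by
  induction l generalizing s with
  | nil => simp
  | cons hd tl ih =>
    simp only [List.foldl_cons]
    rw [ih]
    by_cases h : c hd
    · simp only [if_pos h, PySem.Set.mem_add, List.mem_cons]
      constructor
      · rintro (⟨hs | rfl⟩ | ⟨rfl, j, hj, hc⟩)
        · exact Or.inl hs
        · exact Or.inr ⟨rfl, hd, Or.inl rfl, h⟩
        · exact Or.inr ⟨rfl, j, Or.inr hj, hc⟩
      · rintro (hs | ⟨rfl, j, (rfl | hj), hc⟩)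
        · exact Or.inl (Or.inl hs)
        · exact Or.inl (Or.inr rfl)
        · exact Or.inr ⟨rfl, j, hj, hc⟩
    · simp only [if_neg h, List.mem_cons]
      constructor
      · rintro (hs | ⟨rfl, j, hj, hc⟩)
        · exact Or.inl hs
        · exact Or.inr ⟨rfl, j, Or.inr hj, hc⟩
      · rintro (hs | ⟨rfl, j, (rfl | hj), hc⟩)
        · exact Or.inl hs
        · exact absurd hc h
        · exact Or.inr ⟨rfl, j, hj, hc⟩

-- membership in the double conditional Set.add fold
theorem pv_mem_reduced (c : String → String → Prop) [∀ i, DecidablePred (c i)]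
    (l m : List String) (s : PySem.Set String) (x : String) :
    x ∈ l.foldl
        (fun red str_i => m.foldl
          (fun red str_j => if c str_i str_j then red.add str_i else red) red) s ↔
      x ∈ s ∨ ∃ i ∈ l, x = i ∧ ∃ j ∈ m, c i j := by
  induction l generalizing s with
  | nil => simp
  | cons hd tl ih =>
    simp only [List.foldl_cons]
    rw [ih, pv_mem_inner_fold]
    simp only [List.mem_cons]
    constructor
    · rintro ((hs | ⟨rfl, hj⟩) | ⟨i, hi, rfl, hj⟩)
      · exact Or.inl hs
      · exact Or.inr ⟨x, Or.inl rfl, rfl, hj⟩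
      · exact Or.inr ⟨x, Or.inr hi, rfl, hj⟩
    · rintro (hs | ⟨i, (rfl | hi), rfl, hj⟩)
      · exact Or.inl (Or.inl hs)
      · exact Or.inl (Or.inr ⟨rfl, hj⟩)
      · exact Or.inr ⟨x, hi, rfl, hj⟩

-- the skip/append fold is a filter
theorem pv_foldl_skip_append (q : String → Bool) (l acc : List String) :
    l.foldl (fun out x => if q x then out else out ++ [x]) acc
      = acc ++ l.filter (fun x => !q x) := by
  induction l generalizing acc with
  | nil => simp
  | cons hd tl ih =>
    simp only [List.foldl_cons, List.filter_cons]
    cases h : q hd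
    · simp [ih]
    · simp [ih]

-- the grouping fold: the bucket at f collects exactly the keys of frequency f
theorem pv_group_getD (key : String → Int) (l : List String)
    (g0 : PySem.Dict Int (List String)) (f : Int) :
    (l.foldl (fun g k => g.modify (key k) [] (· ++ [k])) g0).getD f []
      = g0.getD f [] ++ l.filter (fun k => key k == f) := by
  induction l generalizing g0 with
  | nil => simp
  | cons hd tl ih =>
    simp only [List.foldl_cons, List.filter_cons]
    rw [ih]
    have hmod : g0.modify (key hd) [] (· ++ [hd])
        = g0.insert (key hd) (g0.getD (key hd) [] ++ [hd]) := rfl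
    rw [hmod, PySem.Dict.getD_insert]
    by_cases h : f = key hd
    · subst h
      simp [List.append_assoc]
    · have h' : (key hd == f) = false := by
        simp only [beq_eq_false_iff_ne, ne_eq]
        exact fun hc => h hc.symm
      simp [h, h']

-- main lemma: from any frequency dict with distinct keys, A's pairwise-scan
-- reduction and B's frequency-bucket reduction return the same list
theorem pv_reduce_eq (F : PySem.Dict String Int) (hF : F.keys.Nodup) :
    pvReduceA F = pvReduceB F := by
  have hie : (PySem.Dict.empty : PySem.Dict String Int).items = [] := rfl
  set rep : List String := F.keys.filter (fun k => decide (1 < F.getD k 0)) with hrep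
  have hrepnd : rep.Nodup := hF.filter _
  have hitems : (pvFilterGt1 F).items = rep.map (fun k => (k, F.getD k 0)) := by
    unfold pvFilterGt1
    rw [PySem.List.foldl_ite_eq_foldl_filter
          (p := fun k => 1 < F.getD k 0)
          (f := fun (d : PySem.Dict String Int) k => d.insert k (F.getD k 0))]
    rw [PySem.Dict.items_foldl_insert_fresh _ (fun k => k) (fun k => F.getD k 0) _
          (fun a _ => PySem.Dict.contains_empty a) (by simpa using hrepnd)]
    rw [hie, List.nil_append, ← hrep]
  have hkeys : (pvFilterGt1 F).keys = rep := by
    simp only [PySem.Dict.keys, hitems, List.map_map]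
    exact List.map_id rep
  have hget : ∀ k ∈ rep, (pvFilterGt1 F).getD k 0 = F.getD k 0 := by
    intro k hk
    exact PySem.Dict.getD_of_mem_items _
      (by rw [hitems]; exact List.mem_map_of_mem hk)
      (by rw [hkeys]; exact hrepnd) 0
  have hmemred : ∀ k, k ∈ pvReducedSet (pvFilterGt1 F) ↔
      ∃ i ∈ rep, k = i ∧ ∃ j ∈ rep, i ≠ j ∧ PySem.Str.isIn i j = true ∧
        F.getD i 0 = F.getD j 0 := by
    intro k
    unfold pvReducedSet
    rw [hkeys, pv_mem_reduced]
    constructor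
    · rintro (hs | ⟨i, hi, rfl, j, hj, hne, hin, hfe⟩)
      · exact absurd hs (by simp [PySem.Set.empty])
      · exact ⟨k, hi, rfl, j, hj, hne, hin, by rw [← hget k hi, ← hget j hj]; exact hfe⟩
    · rintro ⟨i, hi, rfl, j, hj, hne, hin, hfe⟩
      exact Or.inr ⟨k, hi, rfl, j, hj, hne, hin, by rw [hget k hi, hget j hj]; exact hfe⟩
  simp only [pvReduceA, pvReduceB]
  rw [pv_foldl_skip_append, hkeys, List.nil_append, ← hrep]
  apply List.filter_congr
  intro k hk
  have hiff : (pvReducedSet (pvFilterGt1 F)).contains k = true ↔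
      ((pvGroups F rep).getD (F.getD k 0) []).any
        (fun o => decide (k ≠ o) && PySem.Str.isIn k o) = true := by
    rw [PySem.Set.contains_iff, hmemred k]
    unfold pvGroups
    rw [pv_group_getD (key := fun k => F.getD k 0)]
    simp only [PySem.Dict.getD_empty, List.nil_append, List.any_eq_true, List.mem_filter]
    constructor
    · rintro ⟨i, hi, rfl, j, hj, hne, hin, hfe⟩
      refine ⟨j, ⟨hj, beq_iff_eq.mpr hfe.symm⟩, ?_⟩
      simp only [Bool.and_eq_true, decide_eq_true_eq]
      exact ⟨hne, hin⟩
    · rintro ⟨o, ⟨ho, hfo⟩, hcond⟩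
      simp only [Bool.and_eq_true, decide_eq_true_eq] at hcond
      exact ⟨k, hk, rfl, o, ho, hcond.1, hcond.2, (beq_iff_eq.mp hfo).symm⟩
  have hcany : (pvReducedSet (pvFilterGt1 F)).contains k
      = ((pvGroups F rep).getD (F.getD k 0) []).any
          (fun o => decide (k ≠ o) && PySem.Str.isIn k o) := by
    cases hc : (pvReducedSet (pvFilterGt1 F)).contains k
    · cases hg : ((pvGroups F rep).getD (F.getD k 0) []).any
          (fun o => decide (k ≠ o) && PySem.Str.isIn k o)
      · rfl
      · exact absurd (hiff.mpr hg) (by rw [hc]; simp)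
    · exact (hiff.mp hc).symm
  rw [hcany]

-- the two freq-collection loops build the same dict
theorem pv_freq_eq (line : String) (lower upper : Int) :
    (PySem.List.pyRange lower (upper + 1) 1).foldl
      (fun freq i => freq.update (pyNgrams line i).items) PySem.Dict.empty
    = (PySem.List.pyRange lower (upper + 1) 1).foldl
      (fun freq n =>
        let words := (PySem.Str.split? line " ").getD []
        let counts : PySem.Dict String Int :=
          (PySem.List.pyRange 0 (PySem.List.len words - n + 1) 1).foldl
            (fun c i =>
              let g := PySem.Str.join " " (PySem.List.slice words (some i) (some (i + n)))
              c.insert g (c.getD g 0 + 1))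
            PySem.Dict.empty
        freq.update counts.items)
      PySem.Dict.empty := by
  apply PySem.List.foldl_congr_mem
  intro acc n _
  have hng : pyNgrams line n =
      (PySem.List.pyRange 0
          (PySem.List.len ((PySem.Str.split? line " ").getD []) - n + 1) 1).foldl
        (fun (c : PySem.Dict String Int) i =>
          let g := PySem.Str.join " "
            (PySem.List.slice ((PySem.Str.split? line " ").getD []) (some i) (some (i + n)))
          c.insert g (c.getD g 0 + 1))
        PySem.Dict.empty := by
    unfold pyNgrams
    apply PySem.List.foldl_congr_mem
    intro out i _
    exact pv_counter_step out _
  rw [hng]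

-- an update-fold from the empty dict keeps the keys distinct
theorem pv_nodup_freq (line : String) (lower upper : Int) :
    ((PySem.List.pyRange lower (upper + 1) 1).foldl
      (fun freq i => freq.update (pyNgrams line i).items) PySem.Dict.empty).keys.Nodup := by
  have gen : ∀ (l : List Int) (d : PySem.Dict String Int), d.keys.Nodup →
      (l.foldl (fun acc i => acc.update (pyNgrams line i).items) d).keys.Nodup := by
    intro l
    induction l with
    | nil => exact fun d hd => hd
    | cons x xs ih =>
      intro d hd
      exact ih _ (PySem.Dict.nodup_keys_update d _ hd)
  refine gen _ _ ?_
  rw [PySem.Dict.keys_empty]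
  exact List.nodup_nil

theorem substring_reduction_eq (line : String) (lower upper : Int) :
    substring_reduction line lower upper = substring_reduction_alt line lower upper := by
  show pvReduceA _ = pvReduceB _
  rw [pv_reduce_eq _ (pv_nodup_freq line lower upper), pv_freq_eq]

-- ===== VERDICT (by name: the statement is the Claim_ definition above) =====
theorem substring_reduction_spec : Claim_equal_substring_reduction := by
  intro line lower upper _
  unfold Spec_substring_reduction
  exact substring_reduction_eq line lower upper
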